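-- pv_equiv track=rewrite | github.com/gurujbc/footbag-platform | legacy_data/pipeline/build_workbook_community.py | _effective_event_type
-- ===== SOURCE A (Python) =====
-- def _effective_event_type(declared: str, placements: dict) -> str:
--     """
--     Compute display event type from actual division categories in placements.
--
--     Rules:
--     - 'worlds' declared  → always 'worlds'  (authoritative designation)
--     - sideline / unknown categories are excluded from classification
--     - Remaining distinct categories:
--         single category  → that category label ('net', 'freestyle', 'golf')
--         multiple         → 'mixed'
--     - No placements (or all sideline/unknown) → fall back to declared value
--     """
--     if declared == "worlds":
--         return "worlds"
--     cats: set[str] = set()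
--     for entries in placements.values():
--         for _, _, cat in entries:
--             if cat and cat not in ("sideline", "unknown"):
--                 cats.add(cat)
--     if not cats:
--         return declared or "unknown"
--     return list(cats)[0] if len(cats) == 1 else "mixed"
-- ===== SOURCE B (Python) =====
-- def _effective_event_type(declared: str, placements: dict) -> str:
--     if declared == "worlds":
--         return "worlds"
--     found = None
--     for entries in placements.values():
--         for _, _, cat in entries:
--             if not cat or cat in ("sideline", "unknown"):
--                 continue
--             if found is None:
--                 found = cat
--             elif cat != found:
--                 return "mixed"
--     if found is None:
--         return declared or "unknown"
--     return found
-- ===== Notes on version B (the rewrite author's own statement) =====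
-- stated objective: alternative
-- what changed: Replaces the aggregated category set and the len()-based classification with a single tracked candidate and an early return of 'mixed' on the first second distinct category.
import Mathlib
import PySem

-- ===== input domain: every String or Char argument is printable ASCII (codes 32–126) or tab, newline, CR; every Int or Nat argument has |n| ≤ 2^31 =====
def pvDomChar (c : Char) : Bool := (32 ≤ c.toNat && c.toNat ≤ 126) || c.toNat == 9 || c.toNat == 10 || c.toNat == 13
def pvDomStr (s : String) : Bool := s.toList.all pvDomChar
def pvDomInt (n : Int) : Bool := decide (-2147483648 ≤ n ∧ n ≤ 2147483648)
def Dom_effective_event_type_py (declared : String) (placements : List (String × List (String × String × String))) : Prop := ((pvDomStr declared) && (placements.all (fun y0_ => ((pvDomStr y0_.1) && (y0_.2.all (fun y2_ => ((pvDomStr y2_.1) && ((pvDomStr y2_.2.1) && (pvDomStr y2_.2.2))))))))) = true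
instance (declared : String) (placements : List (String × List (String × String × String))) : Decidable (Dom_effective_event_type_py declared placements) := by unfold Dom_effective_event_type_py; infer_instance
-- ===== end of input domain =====

-- B replaces A's aggregated category set and len()-based branch with a single tracked
-- candidate and an early return of "mixed" on the first second distinct category (objective: alternative).

-- ===== PORT A =====
-- A: collect the valid categories into a set, then classify by the set's size.
def effective_event_type_py (declared : String) (placements : List (String × List (String × String × String))) : String :=
  if declared = "worlds" then "worlds"
  else
    let cats : PySem.Set String :=
      placements.foldl (fun cats p =>
        p.2.foldl (fun cats e =>
          if e.2.2 ≠ "" ∧ e.2.2 ≠ "sideline" ∧ e.2.2 ≠ "unknown" then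
            PySem.Set.add cats e.2.2
          else cats) cats) PySem.Set.empty
    if cats = [] then (if declared = "" then "unknown" else declared)
    else if PySem.Set.len cats = 1 then cats.headD "" else "mixed"

-- ===== PORT B =====
-- B's loop state: `none` = already returned "mixed"; `some found` = still scanning.
def bStep (acc : Option (Option String)) (cat : String) : Option (Option String) :=
  match acc with
  | none => none
  | some found =>
    if cat = "" ∨ cat = "sideline" ∨ cat = "unknown" then some found
    else
      match found with
      | none => some (some cat)
      | some f => if cat = f then some (some f) else none

def effective_event_type_py_alt (declared : String) (placements : List (String × List (String × String × String))) : String :=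
  if declared = "worlds" then "worlds"
  else
    match placements.foldl (fun acc p => p.2.foldl (fun a e => bStep a e.2.2) acc) (some none) with
    | none => "mixed"
    | some none => if declared = "" then "unknown" else declared
    | some (some f) => f

-- ===== PRECONDITION & SPEC =====
def Spec_effective_event_type_py (declared : String) (placements : List (String × List (String × String × String))) (out : String) : Prop := out = effective_event_type_py_alt declared placements
instance (declared : String) (placements : List (String × List (String × String × String))) (out : String) : Decidable (Spec_effective_event_type_py declared placements out) := by unfold Spec_effective_event_type_py; infer_instance

-- ===== CLAIM (what is proved, stated in full; the proofs are below) =====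
def Claim_equal_effective_event_type_py : Prop := ∀ (declared : String) (placements : List (String × List (String × String × String))), Dom_effective_event_type_py declared placements → Spec_effective_event_type_py declared placements (effective_event_type_py declared placements)

-- ===== LEMMAS AND PROOFS =====

-- Relation between A's set state and B's candidate state.
def relState (cats : PySem.Set String) (acc : Option (Option String)) : Prop :=
  match acc with
  | some none => cats = []
  | some (some f) => cats = [f]
  | none => 2 ≤ cats.length

lemma length_set_add (s : PySem.Set String) (x : String) :
    s.length ≤ (PySem.Set.add s x).length := by
  simp [PySem.Set.add]
  split <;> simp

lemma relState_step (cats : PySem.Set String) (acc : Option (Option String)) (cat : String)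
    (h : relState cats acc) :
    relState (if cat ≠ "" ∧ cat ≠ "sideline" ∧ cat ≠ "unknown" then PySem.Set.add cats cat else cats)
      (bStep acc cat) := by
  by_cases hv : cat = "" ∨ cat = "sideline" ∨ cat = "unknown"
  · have hna : ¬ (cat ≠ "" ∧ cat ≠ "sideline" ∧ cat ≠ "unknown") := by tauto
    rw [if_neg hna]
    match acc with
    | none => simp only [bStep]; exact h
    | some found => simp only [bStep, if_pos hv]; exact h
  · have hc : cat ≠ "" ∧ cat ≠ "sideline" ∧ cat ≠ "unknown" := by tauto
    rw [if_pos hc]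
    match acc with
    | none =>
      simp only [bStep, relState] at h ⊢
      exact le_trans h (length_set_add cats cat)
    | some none =>
      simp only [relState] at h
      subst h
      simp [bStep, hv, relState, PySem.Set.add, PySem.Set.contains]
    | some (some f) =>
      simp only [relState] at h
      subst h
      by_cases he : cat = f
      · subst he
        simp [bStep, hv, relState, PySem.Set.add, PySem.Set.contains]
      · simp [bStep, hv, he, relState, PySem.Set.add, PySem.Set.contains]

lemma relState_inner (es : List (String × String × String)) :
    ∀ (cats : PySem.Set String) (acc : Option (Option String)), relState cats acc →
    relState
      (es.foldl (fun cats e =>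
        if e.2.2 ≠ "" ∧ e.2.2 ≠ "sideline" ∧ e.2.2 ≠ "unknown" then PySem.Set.add cats e.2.2
        else cats) cats)
      (es.foldl (fun a e => bStep a e.2.2) acc) := by
  induction es with
  | nil => intro cats acc h; exact h
  | cons e es ih =>
    intro cats acc h
    simp only [List.foldl_cons]
    exact ih _ _ (relState_step cats acc e.2.2 h)

lemma relState_outer (ps : List (String × List (String × String × String))) :
    ∀ (cats : PySem.Set String) (acc : Option (Option String)), relState cats acc →
    relState
      (ps.foldl (fun cats p =>
        p.2.foldl (fun cats e =>
          if e.2.2 ≠ "" ∧ e.2.2 ≠ "sideline" ∧ e.2.2 ≠ "unknown" then PySem.Set.add cats e.2.2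
          else cats) cats) cats)
      (ps.foldl (fun acc p => p.2.foldl (fun a e => bStep a e.2.2) acc) acc) := by
  induction ps with
  | nil => intro cats acc h; exact h
  | cons p ps ih =>
    intro cats acc h
    simp only [List.foldl_cons]
    exact ih _ _ (relState_inner p.2 cats acc h)

-- ===== VERDICT (by name: the statement is the Claim_ definition above) =====
theorem effective_event_type_py_spec : Claim_equal_effective_event_type_py := by
  intro declared placements _
  unfold Spec_effective_event_type_py effective_event_type_py effective_event_type_py_alt
  by_cases hw : declared = "worlds"
  · simp [hw]
  · simp only [hw, if_false]
    have h := relState_outer placements PySem.Set.empty (some none) (by simp [relState, PySem.Set.empty])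
    cases haccF : placements.foldl (fun acc p => p.2.foldl (fun a e => bStep a e.2.2) acc) (some none) with
    | none =>
      rw [haccF] at h
      simp only [relState] at h
      have hne : (placements.foldl (fun cats p =>
          p.2.foldl (fun cats e =>
            if e.2.2 ≠ "" ∧ e.2.2 ≠ "sideline" ∧ e.2.2 ≠ "unknown" then PySem.Set.add cats e.2.2
            else cats) cats) PySem.Set.empty) ≠ [] := by
        intro he; rw [he] at h; simp at h
      have hlen : ¬ PySem.Set.len (placements.foldl (fun cats p =>
          p.2.foldl (fun cats e =>
            if e.2.2 ≠ "" ∧ e.2.2 ≠ "sideline" ∧ e.2.2 ≠ "unknown" then PySem.Set.add cats e.2.2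
            else cats) cats) PySem.Set.empty) = 1 := by
        simp only [PySem.Set.len]; omega
      simp only [if_neg hne, if_neg hlen]
    | some found =>
      cases found with
      | none =>
        rw [haccF] at h
        simp only [relState] at h
        rw [h]
        simp
      | some f =>
        rw [haccF] at h
        simp only [relState] at h
        rw [h]
        simp [PySem.Set.len]
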